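-- pv_equiv track=rewrite | github.com/dilia00/Python | Homework_3/Task_4.py | convert_number_to_binary
-- ===== SOURCE A (Python) =====
-- def convert_number_to_binary(num):
--     binary_num = 0
--     count_ = 1
--     while (num > 0):
--         binary_num = binary_num + (num % 2) * count_
--         count_ = count_ * 10
--         num = num // 2
--     return binary_num
-- ===== SOURCE B (Python) =====
-- def convert_number_to_binary(num):
--     if num <= 0:
--         return 0
--     return (num % 2) + 10 * convert_number_to_binary(num // 2)
-- ===== Notes on version B (the rewrite author's own statement) =====
-- stated objective: simpler
-- what changed: Replaces the while loop with its place-value multiplier accumulator by a direct recursion on the halved number that rebuilds the decimal-encoded binary on return.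
import Mathlib
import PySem

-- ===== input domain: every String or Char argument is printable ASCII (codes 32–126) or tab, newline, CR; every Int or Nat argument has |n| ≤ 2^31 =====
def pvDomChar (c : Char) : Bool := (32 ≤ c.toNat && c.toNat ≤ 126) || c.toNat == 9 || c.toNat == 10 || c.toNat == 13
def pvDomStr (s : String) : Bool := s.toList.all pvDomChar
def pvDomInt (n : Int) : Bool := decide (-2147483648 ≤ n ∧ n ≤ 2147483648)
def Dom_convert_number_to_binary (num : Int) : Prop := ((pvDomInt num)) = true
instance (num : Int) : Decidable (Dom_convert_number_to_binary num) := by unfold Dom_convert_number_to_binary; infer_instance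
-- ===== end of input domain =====

-- B replaces A's loop with a place-value accumulator by a direct recursion on num // 2 (objective: simpler).


-- termination helper for both ports (cited in decreasing_by)
theorem pvHalf_lt (num : Int) (h : num > 0) :
    (PySem.Int.floordiv num 2).toNat < num.toNat := by
  rw [PySem.Int.floordiv_eq_ediv_of_pos (by omega)]
  omega

-- ===== PORT A =====
def convert_number_to_binary_loop (num binary_num count_ : Int) : Int :=
  if h : num > 0 then
    convert_number_to_binary_loop (PySem.Int.floordiv num 2)
      (binary_num + (PySem.Int.mod num 2) * count_) (count_ * 10)
  else binary_num
termination_by num.toNat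
decreasing_by exact pvHalf_lt num h

def convert_number_to_binary (num : Int) : Int :=
  convert_number_to_binary_loop num 0 1

-- ===== PORT B =====
def convert_number_to_binary_alt (num : Int) : Int :=
  if h : num ≤ 0 then 0
  else PySem.Int.mod num 2 + 10 * convert_number_to_binary_alt (PySem.Int.floordiv num 2)
termination_by num.toNat
decreasing_by exact pvHalf_lt num (by omega)

-- ===== PRECONDITION & SPEC =====
def Spec_convert_number_to_binary (num : Int) (out : Int) : Prop := out = convert_number_to_binary_alt num
instance (num : Int) (out : Int) : Decidable (Spec_convert_number_to_binary num out) := by unfold Spec_convert_number_to_binary; infer_instance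

-- ===== CLAIM (what is proved, stated in full; the proofs are below) =====
def Claim_equal_convert_number_to_binary : Prop := ∀ (num : Int), Dom_convert_number_to_binary num → Spec_convert_number_to_binary num (convert_number_to_binary num)

-- ===== LEMMAS AND PROOFS =====

-- loop invariant: the accumulator form equals b + c * (recursive result)
theorem pvLoop_eq (k : Nat) (num b c : Int) (hk : num.toNat ≤ k) :
    convert_number_to_binary_loop num b c = b + c * convert_number_to_binary_alt num := by
  induction k generalizing num b c with
  | zero =>
    rw [convert_number_to_binary_loop, convert_number_to_binary_alt]
    have h0 : ¬ num > 0 := by omega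
    simp [h0, show num ≤ 0 by omega]
  | succ k ih =>
    rw [convert_number_to_binary_loop, convert_number_to_binary_alt]
    by_cases h : num > 0
    · have hlt := pvHalf_lt num h
      rw [dif_pos h, dif_neg (by omega), ih _ _ _ (by omega)]
      ring
    · simp [h, show num ≤ 0 by omega]

-- ===== VERDICT (by name: the statement is the Claim_ definition above) =====
theorem convert_number_to_binary_spec : Claim_equal_convert_number_to_binary := by
  intro num _
  unfold Spec_convert_number_to_binary convert_number_to_binary
  rw [pvLoop_eq num.toNat num 0 1 le_rfl]
  ring
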